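-- pv_equiv track=rewrite | github.com/AliSta12/projekt_semestralny-I | main.py | iupac_find_positions
-- ===== SOURCE A (Python) =====
-- _IUPAC_MASK = {
--     "A": 0b0001,
--     "C": 0b0010,
--     "G": 0b0100,
--     "T": 0b1000,
--     "U": 0b1000,
--     "R": 0b0101,
--     "Y": 0b1010,
--     "S": 0b0110,
--     "W": 0b1001,
--     "K": 0b1100,
--     "M": 0b0011,
--     "B": 0b1110,
--     "D": 0b1101,
--     "H": 0b1011,
--     "V": 0b0111,
--     "N": 0b1111,
-- }
--
-- def matches_iupac(seq_char: str, motif_char: str) -> bool: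
--     """
--     Sprawdza, czy znak sekwencji i motywu mają
--     część wspólną w sensie IUPAC.
--     """
--     try:
--         return (_IUPAC_MASK[seq_char.upper()] &
--                 _IUPAC_MASK[motif_char.upper()]) != 0
--     except KeyError:
--         return False
--
-- def iupac_find_positions(sequence: str, motif: str) -> list[int]:
--     """
--     Znajduje pozycje motywu (IUPAC vs IUPAC).
--     Zwraca listę pozycji (0-based).
--     """
--     seq = sequence.upper().replace("U", "T")
--     mot = motif.upper().replace("U", "T")
--
--     positions = []
--     L = len(seq)
--     mL = len(mot)
--
--     for i in range(L - mL + 1):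
--         match = True
--         for j in range(mL):
--             if not matches_iupac(seq[i + j], mot[j]):
--                 match = False
--                 break
--         if match:
--             positions.append(i)
--
--     return positions
-- ===== SOURCE B (Python) =====
-- _IUPAC_MASK = {
--     "A": 0b0001, "C": 0b0010, "G": 0b0100, "T": 0b1000, "U": 0b1000,
--     "R": 0b0101, "Y": 0b1010, "S": 0b0110, "W": 0b1001, "K": 0b1100,
--     "M": 0b0011, "B": 0b1110, "D": 0b1101, "H": 0b1011, "V": 0b0111,
--     "N": 0b1111,
-- }
--
-- def _mask(c):
--     c = c.upper()
--     if c == "U":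
--         c = "T"
--     return _IUPAC_MASK.get(c, 0)
--
-- def iupac_find_positions(sequence: str, motif: str) -> list[int]:
--     smask = [_mask(c) for c in sequence]
--     mmask = [_mask(c) for c in motif]
--     cands = list(range(len(smask) - len(mmask) + 1))
--     for j, mm in enumerate(mmask):
--         cands = [i for i in cands if smask[i + j] & mm]
--         if not cands:
--             break
--     return cands
-- ===== Notes on version B (the rewrite author's own statement) =====
-- stated objective: alternative
-- what changed: Replaces A's position-major nested rescan (per-window, per-character dict lookups with try/except) by a pattern-major candidate sieve over IUPAC mask arrays computed once per character: candidate start positions are filtered through the motif's mask columns, stopping when no candidate survives.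
import Mathlib
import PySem

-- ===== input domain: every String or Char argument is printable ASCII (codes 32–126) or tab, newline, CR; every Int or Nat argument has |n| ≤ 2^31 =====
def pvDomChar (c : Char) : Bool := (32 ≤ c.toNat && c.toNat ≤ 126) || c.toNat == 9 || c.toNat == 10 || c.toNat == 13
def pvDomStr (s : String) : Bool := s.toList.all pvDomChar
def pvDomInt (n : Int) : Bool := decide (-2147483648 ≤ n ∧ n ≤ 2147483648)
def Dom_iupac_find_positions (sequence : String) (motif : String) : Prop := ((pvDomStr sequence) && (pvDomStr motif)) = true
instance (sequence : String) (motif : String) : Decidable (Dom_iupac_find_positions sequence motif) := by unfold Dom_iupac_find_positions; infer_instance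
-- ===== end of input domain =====

-- B replaces A's per-window rescan (naive O(L·mL) with per-character dict lookups and
-- try/except) by a candidate sieve over precomputed IUPAC mask arrays: same results,
-- different traversal order (pattern-major instead of position-major).

-- the _IUPAC_MASK table (shared constant of both sources)
def iupacMask : List (Char × Nat) :=
  [('A', 1), ('C', 2), ('G', 4), ('T', 8), ('U', 8), ('R', 5), ('Y', 10), ('S', 6),
   ('W', 9), ('K', 12), ('M', 3), ('B', 14), ('D', 13), ('H', 11), ('V', 7), ('N', 15)]

-- ===== PORT A =====
-- matches_iupac: dict lookup of both uppercased chars; KeyError → False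
def matchesIupacA (a b : Char) : Bool :=
  match iupacMask.lookup (PySem.Chars.upperChar a), iupacMask.lookup (PySem.Chars.upperChar b) with
  | some x, some y => decide (x &&& y ≠ 0)
  | _, _ => false

-- inner 'for j in range(mL): … break': recursion over the motif chars carrying j
-- (seq[i+j] is always in range when called from the outer loop, so getD's default is never read)
def aCheck (s : List Char) (mrest : List Char) (i j : Nat) : Bool :=
  match mrest with
  | [] => true
  | c :: rest => if matchesIupacA (s.getD (i + j) ' ') c then aCheck s rest i (j + 1) else false

def iupac_find_positions (sequence : String) (motif : String) : List Int :=
  let seq := (PySem.Str.replace (PySem.Str.upper sequence) "U" "T").toList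
  let mot := (PySem.Str.replace (PySem.Str.upper motif) "U" "T").toList
  let L := seq.length
  let mL := mot.length
  (PySem.List.pyRange 0 ((L : Int) - (mL : Int) + 1) 1).foldl
    (fun acc i => if aCheck seq mot i.toNat 0 then acc ++ [i] else acc) []

-- ===== PORT B =====
-- _mask: uppercase the char, fold U into T, then _IUPAC_MASK.get(c, 0)
def maskB (c : Char) : Nat :=
  let c := PySem.Chars.upperChar c
  let c := if c = 'U' then 'T' else c
  (iupacMask.lookup c).getD 0

-- the sieve loop 'for j, mm in enumerate(mmask): cands = […]; if not cands: break'
def bSieve (smask : List Nat) (cands : List Int) (j : Nat) : List Nat → List Int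
  | [] => cands
  | mm :: rest =>
      let c' := cands.filter (fun i => decide (smask.getD (i.toNat + j) 0 &&& mm ≠ 0))
      if c' = [] then c' else bSieve smask c' (j + 1) rest

def iupac_find_positions_alt (sequence : String) (motif : String) : List Int :=
  let smask := sequence.toList.map maskB
  let mmask := motif.toList.map maskB
  let cands := PySem.List.pyRange 0 ((smask.length : Int) - (mmask.length : Int) + 1) 1
  bSieve smask cands 0 mmask

-- ===== PRECONDITION & SPEC =====
def Spec_iupac_find_positions (sequence : String) (motif : String) (out : List Int) : Prop := out = iupac_find_positions_alt sequence motif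
instance (sequence : String) (motif : String) (out : List Int) : Decidable (Spec_iupac_find_positions sequence motif out) := by unfold Spec_iupac_find_positions; infer_instance

-- ===== CLAIM (what is proved, stated in full; the proofs are below) =====
def Claim_equal_iupac_find_positions : Prop := ∀ (sequence : String) (motif : String), Dom_iupac_find_positions sequence motif → Spec_iupac_find_positions sequence motif (iupac_find_positions sequence motif)

-- ===== LEMMAS AND PROOFS =====

-- the per-character transformation A applies to both strings (upper, then U→T)
def trChar (c : Char) : Char :=
  if PySem.Chars.upperChar c = 'U' then 'T' else PySem.Chars.upperChar c

theorem charOfNat_toNat (n : Nat) (h : n.isValidChar) : (Char.ofNat n).toNat = n := by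
  unfold Char.ofNat; rw [dif_pos h]; rfl

theorem upperChar_idem (c : Char) :
    PySem.Chars.upperChar (PySem.Chars.upperChar c) = PySem.Chars.upperChar c := by
  unfold PySem.Chars.upperChar PySem.Chars.islower
  split_ifs with h1 h2 <;> try rfl
  exfalso
  simp only [decide_eq_true_eq, Bool.and_eq_true] at h1 h2
  have hc1 : 97 ≤ c.toNat := h1.1
  have hc2 : c.toNat ≤ 122 := h1.2
  have hv : (c.toNat - 32).isValidChar := by left; omega
  have ht : (Char.ofNat (c.toNat - 32)).toNat = c.toNat - 32 := charOfNat_toNat _ hv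
  have hb1 : 97 ≤ (Char.ofNat (c.toNat - 32)).toNat := h2.1
  omega

theorem trChar_upper_fixed (c : Char) : PySem.Chars.upperChar (trChar c) = trChar c := by
  unfold trChar
  split_ifs with h
  · decide
  · exact upperChar_idem c

theorem replace_go_single (u v : Char) : ∀ (fuel : Nat) (l acc : List Char), l.length ≤ fuel →
    PySem.Chars.replace.go [u] [v] fuel l acc = acc.reverse ++ l.map (fun c => if c = u then v else c) := by
  intro fuel
  induction fuel with
  | zero =>
      intro l acc h
      interval_cases hl : l.length
      simp_all [PySem.Chars.replace.go, List.length_eq_zero_iff.mp hl]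
  | succ n ih =>
    intro l acc h
    match l with
    | [] => simp [PySem.Chars.replace.go]
    | c :: t =>
      simp only [PySem.Chars.replace.go]
      by_cases hc : c = u
      · rw [if_pos (by simp [hc, List.isPrefixOf])]
        simp only [List.length_cons] at h
        rw [ih _ _ (by simpa using Nat.le_of_succ_le_succ h)]
        simp [hc]
      · rw [if_neg (by simp [List.isPrefixOf]; exact fun h' => hc h'.symm)]
        simp only [List.length_cons] at h
        rw [ih _ _ (Nat.le_of_succ_le_succ h)]
        simp [hc]

theorem replace_single (u v : Char) (l : List Char) :
    PySem.Chars.replace l [u] [v] = l.map (fun c => if c = u then v else c) := by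
  unfold PySem.Chars.replace
  rw [if_neg (by simp)]
  simpa using replace_go_single u v l.length l [] le_rfl

-- A's preprocessed string, char by char
theorem trList (s : String) :
    (PySem.Str.replace (PySem.Str.upper s) "U" "T").toList = s.toList.map trChar := by
  have : ("U" : String).toList = ['U'] := rfl
  have : ("T" : String).toList = ['T'] := rfl
  simp only [PySem.Str.toList_replace, PySem.Str.toList_upper]
  show PySem.Chars.replace (PySem.Chars.upper s.toList) ['U'] ['T'] = _
  rw [replace_single]
  unfold PySem.Chars.upper trChar
  rw [List.map_map]
  rfl

-- maskB is the table lookup of the transformed character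
theorem maskB_eq (c : Char) : maskB c = (iupacMask.lookup (trChar c)).getD 0 := rfl

-- the per-character core: A's matcher on two upper-fixed chars is the mask test
theorem matchesIupacA_eq (x y : Char)
    (hx : PySem.Chars.upperChar x = x) (hy : PySem.Chars.upperChar y = y) :
    matchesIupacA x y = decide ((iupacMask.lookup x).getD 0 &&& (iupacMask.lookup y).getD 0 ≠ 0) := by
  unfold matchesIupacA
  rw [hx, hy]
  cases iupacMask.lookup x <;> cases iupacMask.lookup y <;> simp

-- window check: A's early-exit scan over the motif equals B's mask conjunction
def winOK (smask : List Nat) (i : Int) (j : Nat) : List Nat → Bool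
  | [] => true
  | mm :: rest => (decide (smask.getD (i.toNat + j) 0 &&& mm ≠ 0)) && winOK smask i (j + 1) rest

theorem aCheck_eq_winOK (s : List Char) :
    ∀ (m : List Char) (i : Int) (j : Nat),
      aCheck (s.map trChar) (m.map trChar) i.toNat j
        = winOK (s.map maskB) i j (m.map maskB) := by
  intro m
  induction m with
  | nil => intro i j; rfl
  | cons c rest ih =>
    intro i j
    have hchar : matchesIupacA ((s.map trChar).getD (i.toNat + j) ' ') (trChar c)
        = decide ((s.map maskB).getD (i.toNat + j) 0 &&& maskB c ≠ 0) := by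
      by_cases hk : i.toNat + j < s.length
      · rw [List.getD_eq_getElem _ _ (by simpa using hk), List.getD_eq_getElem _ _ (by simpa using hk)]
        simp only [List.getElem_map]
        rw [matchesIupacA_eq _ _ (trChar_upper_fixed _) (trChar_upper_fixed c),
            maskB_eq, maskB_eq c]
      · rw [List.getD_eq_default _ _ (by simpa using Nat.le_of_not_lt hk),
            List.getD_eq_default _ _ (by simpa using Nat.le_of_not_lt hk)]
        rw [matchesIupacA_eq ' ' (trChar c) (by decide) (trChar_upper_fixed c), maskB_eq c]
        have hsp : List.lookup ' ' iupacMask = none := by decide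
        simp [hsp]
    have hstep : aCheck (s.map trChar) (trChar c :: rest.map trChar) i.toNat j
        = if matchesIupacA ((s.map trChar).getD (i.toNat + j) ' ') (trChar c)
          then aCheck (s.map trChar) (rest.map trChar) i.toNat (j + 1) else false := rfl
    show aCheck (s.map trChar) (trChar c :: rest.map trChar) i.toNat j
        = winOK (s.map maskB) i j (maskB c :: rest.map maskB)
    rw [hstep, hchar]
    show _ = (decide ((s.map maskB).getD (i.toNat + j) 0 &&& maskB c ≠ 0)
        && winOK (s.map maskB) i (j + 1) (rest.map maskB))
    cases hd : decide ((s.map maskB).getD (i.toNat + j) 0 &&& maskB c ≠ 0) with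
    | false => rfl
    | true => simpa using ih i (j + 1)

-- B's sieve is the filter by the full window conjunction (break-on-empty included)
theorem bSieve_eq_filter (smask : List Nat) :
    ∀ (ms : List Nat) (cands : List Int) (j : Nat),
      bSieve smask cands j ms = cands.filter (fun i => winOK smask i j ms) := by
  intro ms
  induction ms with
  | nil => intro cands j; simp [bSieve, winOK]
  | cons mm rest ih =>
    intro cands j
    have hsplit : cands.filter (fun i => winOK smask i j (mm :: rest))
        = (cands.filter (fun i => decide (smask.getD (i.toNat + j) 0 &&& mm ≠ 0))).filter
            (fun i => winOK smask i (j + 1) rest) := by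
      rw [List.filter_filter]
      exact List.filter_congr (fun i _ => Bool.and_comm _ _)
    simp only [bSieve]
    by_cases he : cands.filter (fun i => decide (smask.getD (i.toNat + j) 0 &&& mm ≠ 0)) = []
    · rw [if_pos he, hsplit, he]
      rfl
    · rw [if_neg he, ih, hsplit]

-- ===== VERDICT (by name: the statement is the Claim_ definition above) =====
theorem iupac_find_positions_spec : Claim_equal_iupac_find_positions := by
  intro sequence motif _
  unfold Spec_iupac_find_positions iupac_find_positions iupac_find_positions_alt
  simp only [trList]
  rw [PySem.List.foldl_append_if_eq_filter, bSieve_eq_filter]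
  simp only [List.nil_append, List.length_map]
  apply List.filter_congr
  intro i _
  exact aCheck_eq_winOK sequence.toList motif.toList i 0
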